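-- pv_equiv track=rewrite | github.com/koteitan/repeated-maze | maze/minsky-doubling/minsky-doubling.py | compute_path_length
-- ===== SOURCE A (Python) =====
-- def compute_path_length(k):
--     """Exact path length for k-fold ×2 doubling.
--
--     Each doubling cycle: y_new = 1 + 2*y_old
--     y_k = 2^(k+1) - 1
--     """
--     y = [0] * (k + 1)
--     y[0] = 1
--     for i in range(1, k + 1):
--         y[i] = 1 + 2 * y[i - 1]
--
--     total = 0
--     for i in range(k):
--         yi = y[i]
--         x_after = 1 + 2 * yi
--         transition = 1           # W→N entry
--         p1 = 4 * yi              # Phase 1 loop (INC_X×2 + dir_change + DEC_Y) × yi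
--         ny_catch = 1
--         bridge = 1               # S→E (y: 0→1)
--         p2 = 3 * (x_after - 1) + 1 + 1  # (DEC_X + dir + INC_Y)×(x-1) + last_DEC_X + nx_catch
--         total += transition + p1 + ny_catch + bridge + p2
--
--     # Phase 3: transition + DEC_Y×y_k + ny + bridge + goal
--     total += 1 + y[k] + 1 + 1 + 1
--     return total, y[k]
-- ===== SOURCE B (Python) =====
-- def compute_path_length(k):
--     """Exact path length for k-fold x2 doubling, in closed form.
--
--     y_i = 2^(i+1)-1; each loop term is 10*y_i + 5, so the loop sum telescopes
--     to 10*(2^(k+1)-2) - 5k, and the final phase adds 2^(k+1)+3.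
--     """
--     p = 1 << (k + 1)
--     return 11 * p - 5 * k - 17, p - 1
-- ===== Notes on version B (the rewrite author's own statement) =====
-- stated objective: faster
-- what changed: Replaced the list-building recurrence and the O(k) summation loop by the closed-form geometric sum 11*2^(k+1)-5k-17 (and y_k = 2^(k+1)-1) obtained by substituting y_i=2^(i+1)-1 into the per-term polynomial 10*y_i+5.
import Mathlib
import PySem

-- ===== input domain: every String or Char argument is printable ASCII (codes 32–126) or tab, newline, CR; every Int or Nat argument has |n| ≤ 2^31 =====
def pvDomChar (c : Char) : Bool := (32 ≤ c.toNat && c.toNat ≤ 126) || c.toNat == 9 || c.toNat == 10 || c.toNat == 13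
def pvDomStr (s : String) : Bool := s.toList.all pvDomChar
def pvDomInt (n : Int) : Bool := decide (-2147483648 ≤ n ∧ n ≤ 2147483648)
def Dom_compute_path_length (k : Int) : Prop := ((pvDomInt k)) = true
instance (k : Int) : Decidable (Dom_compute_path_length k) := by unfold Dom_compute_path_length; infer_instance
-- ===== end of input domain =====

-- B replaces A's O(k) recurrence-and-loop by the closed-form geometric sum (objective: faster).

-- ===== PORT A =====
def compute_path_length (k : Int) : Int × Int :=
  -- y = [0] * (k + 1); y[0] = 1
  let y0 : List Int := PySem.List.pySetD (PySem.List.pyRepeat [0] (k + 1)) 0 1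
  -- for i in range(1, k + 1): y[i] = 1 + 2 * y[i - 1]
  let y := (PySem.List.pyRange 1 (k + 1) 1).foldl
    (fun y i => PySem.List.pySetD y i (1 + 2 * PySem.List.pyGetD y (i - 1) 0)) y0
  -- for i in range(k): total += ...
  let total := (PySem.List.pyRange 0 k 1).foldl
    (fun total i =>
      let yi := PySem.List.pyGetD y i 0
      let x_after := 1 + 2 * yi
      let transition : Int := 1
      let p1 := 4 * yi
      let ny_catch : Int := 1
      let bridge : Int := 1
      let p2 := 3 * (x_after - 1) + 1 + 1
      total + (transition + p1 + ny_catch + bridge + p2)) 0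
  let yk := PySem.List.pyGetD y k 0
  (total + (1 + yk + 1 + 1 + 1), yk)

-- ===== PORT B =====
def compute_path_length_alt (k : Int) : Int × Int :=
  let p : Int := 2 ^ (k + 1).toNat   -- 1 << (k + 1)
  (11 * p - 5 * k - 17, p - 1)

-- ===== PRECONDITION & SPEC =====
-- A raises IndexError for k < 0 ([0]*(k+1) is empty, so y[0] = 1 fails).
def Pre_compute_path_length (k : Int) : Prop := 0 ≤ k
instance (k : Int) : Decidable (Pre_compute_path_length k) := by unfold Pre_compute_path_length; infer_instance
def pvWitness_compute_path_length : Int := 3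

def Spec_compute_path_length (k : Int) (out : Int × Int) : Prop := out = compute_path_length_alt k
instance (k : Int) (out : Int × Int) : Decidable (Spec_compute_path_length k out) := by unfold Spec_compute_path_length; infer_instance

-- ===== CLAIM (what is proved, stated in full; the proofs are below) =====
def Claim_equal_compute_path_length : Prop := ∀ (k : Int), Dom_compute_path_length k → Pre_compute_path_length k → Spec_compute_path_length k (compute_path_length k)

-- ===== LEMMAS AND PROOFS =====

/-- The exact value of `y[i]`: `y_i = 2^(i+1) - 1`. -/
def pvG (i : Nat) : Int := 2 ^ (i + 1) - 1

lemma pvG_succ (m : Nat) : 1 + 2 * pvG m = pvG (m + 1) := by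
  simp [pvG, pow_succ]; ring

/-- Invariant of A's list-building loop. -/
lemma pv_buildAux (n : Nat) : ∀ (d m : Nat), m + d = n →
    (PySem.List.pyRange ((m : Int) + 1) ((n : Int) + 1) 1).foldl
      (fun y i => PySem.List.pySetD y i (1 + 2 * PySem.List.pyGetD y (i - 1) 0))
      ((List.range (m + 1)).map pvG ++ List.replicate d 0)
    = (List.range (n + 1)).map pvG := by
  intro d
  induction d with
  | zero =>
    intro m hm
    obtain rfl : m = n := by omega
    rw [PySem.List.pyRange_one_eq_nil le_rfl]
    simp
  | succ d ih =>
    intro m hm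
    have hlt : (m : Int) + 1 < (n : Int) + 1 := by omega
    rw [PySem.List.pyRange_one_cons hlt]
    simp only [List.foldl_cons]
    have e1 : (m : Int) + 1 - 1 = ((m : Nat) : Int) := by ring
    have hget : PySem.List.pyGetD
        ((List.range (m + 1)).map pvG ++ List.replicate (d + 1) (0 : Int)) ((m : Int) + 1 - 1) 0
        = pvG m := by
      rw [e1, PySem.List.pyGetD_natCast]
      rw [List.getD_append _ _ _ _ (by simp)]
      rw [List.getD_eq_getElem _ _ (by simp)]
      rw [List.getElem_map, List.getElem_range]
    rw [hget]
    have hset : PySem.List.pySetD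
        ((List.range (m + 1)).map pvG ++ List.replicate (d + 1) (0 : Int)) ((m : Int) + 1)
        (1 + 2 * pvG m)
        = (List.range (m + 1 + 1)).map pvG ++ List.replicate d 0 := by
      have h1 : ((m : Int) + 1) = (((m + 1 : Nat)) : Int) := by push_cast; ring
      rw [h1, PySem.List.pySetD_natCast]
      rw [List.set_append_right _ _ (by simp)]
      simp [List.replicate_succ, List.range_succ, pvG_succ]
    rw [hset]
    have e2 : (m : Int) + 1 + 1 = ((m + 1 : Nat) : Int) + 1 := by push_cast; ring
    rw [e2]
    exact ih (m + 1) (by omega)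

/-- A's first loop builds exactly the list `[2^(i+1) - 1 | i ≤ n]`. -/
lemma pv_build (n : Nat) :
    (PySem.List.pyRange 1 ((n : Int) + 1) 1).foldl
      (fun y i => PySem.List.pySetD y i (1 + 2 * PySem.List.pyGetD y (i - 1) 0))
      (PySem.List.pySetD (PySem.List.pyRepeat [0] ((n : Int) + 1)) 0 1)
    = (List.range (n + 1)).map pvG := by
  have h0 : PySem.List.pySetD (PySem.List.pyRepeat [(0 : Int)] ((n : Int) + 1)) 0 1
      = (List.range 1).map pvG ++ List.replicate n 0 := by
    rw [PySem.List.pyRepeat_singleton]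
    have ht : ((n : Int) + 1).toNat = n + 1 := by omega
    rw [ht]
    simp [PySem.List.pySetD_of_nonneg, List.replicate_succ, pvG]
  have h := pv_buildAux n n 0 (by omega)
  simp only [Nat.cast_zero, zero_add] at h
  rw [h0]
  exact h

/-- The value A reads as `y[j]` for `0 ≤ j ≤ n`. -/
lemma pv_read (n j : Nat) (hj : j ≤ n) :
    PySem.List.pyGetD ((List.range (n + 1)).map pvG) (j : Int) 0 = pvG j := by
  rw [PySem.List.pyGetD_natCast]
  rw [List.getD_eq_getElem _ _ (by simp; omega)]
  rw [List.getElem_map, List.getElem_range]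

/-- A's summation loop in closed form. -/
lemma pv_loop (N : Nat) : ∀ n : Nat, n ≤ N →
    (PySem.List.pyRange 0 (n : Int) 1).foldl
      (fun total i => total +
        (1 + 4 * PySem.List.pyGetD ((List.range (N + 1)).map pvG) i 0 + 1 + 1 +
          (3 * (1 + 2 * PySem.List.pyGetD ((List.range (N + 1)).map pvG) i 0 - 1) + 1 + 1))) 0
    = 10 * (2 ^ (n + 1) - 2) - 5 * (n : Int) := by
  intro n
  induction n with
  | zero =>
    intro _
    rw [PySem.List.pyRange_one_eq_nil (by simp)]
    norm_num
  | succ n ih =>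
    intro hn
    have e : ((n + 1 : Nat) : Int) = (n : Int) + 1 := by push_cast; ring
    rw [e, PySem.List.pyRange_one_succ_right (by omega), List.foldl_append]
    rw [ih (by omega)]
    simp only [List.foldl_cons, List.foldl_nil]
    rw [pv_read N n (by omega)]
    simp only [pvG, pow_succ]
    ring

-- ===== VERDICT (by name: the statement is the Claim_ definition above) =====
theorem compute_path_length_spec : Claim_equal_compute_path_length := by
  intro k _ hpre
  unfold Spec_compute_path_length
  lift k to ℕ using hpre with n
  simp only [compute_path_length, compute_path_length_alt]
  rw [pv_build n]
  rw [pv_loop n n le_rfl]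
  rw [pv_read n n le_rfl]
  have ht : ((n : Int) + 1).toNat = n + 1 := by omega
  rw [ht]
  simp only [pvG, Prod.mk.injEq]
  constructor <;> first | ring | trivial
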